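-- pv_equiv track=rewrite | github.com/binxio/aws-cfn-update | src/aws_cfn_update/cfn_updater.py | _standardize_multi_sequence_indent
-- ===== SOURCE A (Python) =====
-- def _standardize_multi_sequence_indent(line: str) -> str:
--     """
--     >>> _standardize_multi_sequence_indent("    -    -    - a  ")
--     '    - - - a  '
--     """
--     offset = 0
--     dashes = 0
--     preamble = 0
--     while offset < len(line) and line[offset] == " ":
--         offset += 1
--         preamble += 1
--
--     while offset < len(line) and line[offset] in [" ", "-"]:
--         if line[offset] == "-":
--             dashes += 1
--         offset += 1
--
--     if not offset:
--         return line
--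
--     return " " * preamble + "- " * dashes + line[offset:]
-- ===== SOURCE B (Python) =====
-- def _standardize_multi_sequence_indent(line: str) -> str:
--     # Single forward pass: emit the normalized prefix token-by-token, tracking
--     # whether a dash has been seen (spaces after the first dash are dropped,
--     # each dash emits '- '); stop and splice the untouched tail at the first
--     # character that is neither space nor dash.
--     out = []
--     seen_dash = False
--     for i, c in enumerate(line):
--         if c == '-':
--             out.append('- ')
--             seen_dash = True
--         elif c == ' ':
--             if not seen_dash:
--                 out.append(' ')
--         else:
--             return ''.join(out) + line[i:]
--     return ''.join(out)
-- ===== Notes on version B (the rewrite author's own statement) =====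
-- stated objective: alternative
-- what changed: A makes two staged counting scans (count leading spaces, then count dashes in the dash/space block) and rebuilds the prefix from the counts; B is a single forward pass with a seen-dash state flag that emits the normalized output token-by-token and splices the untouched tail at the first other character.
import Mathlib
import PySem

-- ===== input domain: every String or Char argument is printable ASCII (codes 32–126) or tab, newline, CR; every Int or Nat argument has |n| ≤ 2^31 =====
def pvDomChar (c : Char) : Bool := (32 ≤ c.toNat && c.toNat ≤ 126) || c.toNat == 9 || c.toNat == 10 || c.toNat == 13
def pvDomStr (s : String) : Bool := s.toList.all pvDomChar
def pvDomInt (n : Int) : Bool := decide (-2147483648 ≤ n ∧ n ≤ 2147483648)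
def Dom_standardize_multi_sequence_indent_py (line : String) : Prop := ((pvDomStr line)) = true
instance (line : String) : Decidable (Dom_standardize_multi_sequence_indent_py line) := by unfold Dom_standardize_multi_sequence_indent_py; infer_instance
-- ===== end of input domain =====

-- B replaces A's two counting scans + rebuild-from-counts by a single forward pass with a
-- seen-dash state flag that emits the normalized output as it goes; objective: alternative.

-- ===== PORT A =====
-- first while loop: count leading spaces (offset and preamble advance together)
def aScanSpaces : List Char → Nat → Nat → Nat × Nat
  | c :: rest, offset, preamble =>
      if c = ' ' then aScanSpaces rest (offset + 1) (preamble + 1) else (offset, preamble)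
  | [], offset, preamble => (offset, preamble)

-- second while loop: advance over spaces and dashes, counting dashes
def aScanDashes : List Char → Nat → Nat → Nat × Nat
  | c :: rest, offset, dashes =>
      if c = ' ' ∨ c = '-' then
        aScanDashes rest (offset + 1) (if c = '-' then dashes + 1 else dashes)
      else (offset, dashes)
  | [], offset, dashes => (offset, dashes)

def standardize_multi_sequence_indent_py (line : String) : String :=
  let cs := line.toList
  let sp := aScanSpaces cs 0 0
  let sd := aScanDashes (cs.drop sp.1) sp.1 0
  if sd.1 = 0 then line
  else String.ofList (List.replicate sp.2 ' ' ++ (List.replicate sd.2 ['-', ' ']).flatten ++ cs.drop sd.1)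

-- ===== PORT B =====
-- Source B's single loop: out accumulator, seen-dash flag; 'c :: rest' is line[i:] at the break
def bGo : List Char → Bool → List Char → String
  | [], _, acc => String.ofList acc
  | c :: rest, seen, acc =>
      if c = '-' then bGo rest true (acc ++ ['-', ' '])
      else if c = ' ' then bGo rest seen (if seen then acc else acc ++ [' '])
      else String.ofList (acc ++ (c :: rest))

def standardize_multi_sequence_indent_py_alt (line : String) : String :=
  bGo line.toList false []

-- ===== PRECONDITION & SPEC =====
def Spec_standardize_multi_sequence_indent_py (line : String) (out : String) : Prop := out = standardize_multi_sequence_indent_py_alt line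
instance (line : String) (out : String) : Decidable (Spec_standardize_multi_sequence_indent_py line out) := by unfold Spec_standardize_multi_sequence_indent_py; infer_instance

-- ===== CLAIM (what is proved, stated in full; the proofs are below) =====
def Claim_equal_standardize_multi_sequence_indent_py : Prop := ∀ (line : String), Dom_standardize_multi_sequence_indent_py line → Spec_standardize_multi_sequence_indent_py line (standardize_multi_sequence_indent_py line)

-- ===== LEMMAS AND PROOFS =====

theorem aScanSpaces_eq (cs : List Char) : ∀ (k p : Nat),
    aScanSpaces cs k p = (k + (cs.takeWhile (· = ' ')).length, p + (cs.takeWhile (· = ' ')).length) := by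
  induction cs with
  | nil => intro k p; simp [aScanSpaces]
  | cons c rest ih =>
    intro k p
    by_cases h : c = ' '
    · simp [aScanSpaces, h, List.takeWhile, ih, Nat.add_assoc, Nat.add_comm 1]
    · simp [aScanSpaces, h, List.takeWhile]

theorem aScanDashes_eq (cs : List Char) : ∀ (k d : Nat),
    aScanDashes cs k d = (k + (cs.takeWhile (fun c => c = '-' || c = ' ')).length,
                          d + (cs.takeWhile (fun c => c = '-' || c = ' ')).count '-') := by
  induction cs with
  | nil => intro k d; simp [aScanDashes]
  | cons c rest ih =>
    intro k d
    by_cases h : c = ' ' ∨ c = '-'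
    · by_cases hd : c = '-'
      · simp [aScanDashes, hd, List.takeWhile, ih, Nat.add_assoc, Nat.add_comm 1]
      · have hs : c = ' ' := by tauto
        simp [aScanDashes, hs, List.takeWhile, ih, Nat.add_assoc, Nat.add_comm 1]
    · have h' : (c = '-' || c = ' ') = false := by
        push Not at h; simp [h.1, h.2]
      simp [aScanDashes, h, List.takeWhile, h']

theorem takeWhile_space_replicate (cs : List Char) :
    cs.takeWhile (· = ' ') = List.replicate (cs.takeWhile (· = ' ')).length ' ' := by
  rw [List.eq_replicate_iff]
  refine ⟨rfl, ?_⟩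
  intro c hc
  have := List.mem_takeWhile_imp hc
  simpa using this

theorem dropWhile_eq_drop {α : Type} (p : α → Bool) (cs : List α) :
    cs.dropWhile p = cs.drop (cs.takeWhile p).length := by
  induction cs with
  | nil => rfl
  | cons c rest ih =>
    by_cases h : p c
    · simp [List.dropWhile, List.takeWhile, h, ih]
    · simp [List.dropWhile, List.takeWhile, h]

-- B phase 1: while seen = false, spaces are copied into the accumulator
theorem bGo_spaces (cs : List Char) : ∀ (acc : List Char),
    bGo cs false acc = bGo (cs.dropWhile (· = ' ')) false (acc ++ cs.takeWhile (· = ' ')) := by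
  induction cs with
  | nil => intro acc; simp [List.dropWhile, List.takeWhile]
  | cons c rest ih =>
    intro acc
    by_cases h : c = ' '
    · simp [bGo, h, List.dropWhile, List.takeWhile, ih]
    · simp [List.dropWhile, List.takeWhile, h]

-- B phase 2: with seen = true, each dash emits "- " and spaces are dropped
theorem bGo_dashes (cs : List Char) : ∀ (acc : List Char),
    bGo cs true acc = String.ofList (acc
      ++ (List.replicate ((cs.takeWhile (fun c => c = '-' || c = ' ')).count '-') ['-', ' ']).flatten
      ++ cs.drop (cs.takeWhile (fun c => c = '-' || c = ' ')).length) := by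
  induction cs with
  | nil => intro acc; simp [bGo, List.takeWhile]
  | cons c rest ih =>
    intro acc
    by_cases hd : c = '-'
    · simp [bGo, hd, List.takeWhile, ih, List.replicate_succ, List.append_assoc]
    · by_cases hs : c = ' '
      · simp [bGo, hs, List.takeWhile, ih]
      · simp [bGo, hd, hs, List.takeWhile]

-- B seam: from a list not starting with a space, bGo in state false yields the canonical form
theorem bGo_start (cs : List Char) (acc : List Char) (h : cs.head? ≠ some ' ') :
    bGo cs false acc = String.ofList (acc
      ++ (List.replicate ((cs.takeWhile (fun c => c = '-' || c = ' ')).count '-') ['-', ' ']).flatten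
      ++ cs.drop (cs.takeWhile (fun c => c = '-' || c = ' ')).length) := by
  cases cs with
  | nil => simp [bGo, List.takeWhile]
  | cons c rest =>
    by_cases hd : c = '-'
    · simp [bGo, hd, List.takeWhile, bGo_dashes, List.replicate_succ, List.append_assoc]
    · have hs : ¬ (c = ' ') := by simpa [hd] using h
      simp [bGo, hd, hs, List.takeWhile]

-- ===== VERDICT (by name: the statement is the Claim_ definition above) =====
theorem standardize_multi_sequence_indent_py_spec : Claim_equal_standardize_multi_sequence_indent_py := by
  intro line _
  unfold Spec_standardize_multi_sequence_indent_py
  unfold standardize_multi_sequence_indent_py standardize_multi_sequence_indent_py_alt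
  simp only [aScanSpaces_eq, aScanDashes_eq, Nat.zero_add]
  set cs := line.toList with hcs
  set t1 := cs.takeWhile (· = ' ') with ht1
  set t2 := (cs.drop t1.length).takeWhile (fun c => c = '-' || c = ' ') with ht2
  have hdw : cs.dropWhile (· = ' ') = cs.drop t1.length := by
    rw [ht1]; exact dropWhile_eq_drop _ cs
  have hhead : (cs.drop t1.length).head? ≠ some ' ' := by
    rw [← hdw]
    intro hc
    have := List.head?_dropWhile_not (p := (· = ' ')) (l := cs)
    rw [hc] at this
    simp at this
  have hB : bGo cs false [] = String.ofList (t1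
      ++ (List.replicate (t2.count '-') ['-', ' ']).flatten
      ++ cs.drop (t1.length + t2.length)) := by
    rw [bGo_spaces, hdw, ← ht1, bGo_start _ _ hhead, ← ht2]
    congr 1
    rw [List.nil_append, List.drop_drop, Nat.add_comm]
  rw [hB]
  by_cases hz : t1.length + t2.length = 0
  · have h1 : t1 = [] := List.eq_nil_of_length_eq_zero (Nat.eq_zero_of_add_eq_zero_right hz)
    have h2 : t2 = [] := List.eq_nil_of_length_eq_zero (Nat.eq_zero_of_add_eq_zero_left hz)
    rw [if_pos hz, h1, h2]
    simp [hcs, String.ofList_toList]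
  · rw [if_neg hz, ht1, ← takeWhile_space_replicate cs]
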